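-- pv_equiv track=rewrite | github.com/annakioko/mock-codility | app.py | Transactions
-- ===== SOURCE A (Python) =====
-- def Transactions(A, D):
--     Annual_income = sum(amount for amount in A if amount > 0)
--     Annual_expenses = sum(amount for amount in A if amount < 0)
--
--     months = set(date.split('-')[1] for date in D)
--     total_months = len(months)
--
--     if total_months > 1:
--         total_months_with_fees = total_months - 1
--
--         monthly_fee = 5
--         total_fees = total_months_with_fees * monthly_fee
--
--         for month in months:
--             month_transactions = [A[x] for x, date in enumerate(D) if date.split('-')[1] == month]
--             card_payments = sum(amount for amount in month_transactions if amount < 0)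
--
--             if card_payments <= -100:
--                 total_fees -= monthly_fee
--     else:
--         total_months_with_fees = 0
--         total_fees = 0
--
--     final_balance = Annual_income - Annual_expenses - total_fees
--
--     return final_balance
-- ===== SOURCE B (Python) =====
-- def Transactions(A, D):
--     income = 0
--     expenses = 0
--     for a in A:
--         if a > 0:
--             income += a
--         elif a < 0:
--             expenses += a
--     neg = {}
--     for date, a in zip(D, A):
--         m = date.split('-')[1]
--         neg[m] = neg.get(m, 0) + (a if a < 0 else 0)
--     fees = 0
--     if len(neg) > 1:
--         fees = (len(neg) - 1) * 5
--         for v in neg.values():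
--             if v <= -100:
--                 fees -= 5
--     return income - expenses - fees
-- ===== Notes on version B (the rewrite author's own statement) =====
-- stated objective: faster
-- what changed: B builds a month->negative-total dict in one pass over zip(D, A) and reads fees off the dict values, instead of A's per-distinct-month rescan of the whole transaction list (enumerate + filter) inside a loop over the month set.
import Mathlib
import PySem

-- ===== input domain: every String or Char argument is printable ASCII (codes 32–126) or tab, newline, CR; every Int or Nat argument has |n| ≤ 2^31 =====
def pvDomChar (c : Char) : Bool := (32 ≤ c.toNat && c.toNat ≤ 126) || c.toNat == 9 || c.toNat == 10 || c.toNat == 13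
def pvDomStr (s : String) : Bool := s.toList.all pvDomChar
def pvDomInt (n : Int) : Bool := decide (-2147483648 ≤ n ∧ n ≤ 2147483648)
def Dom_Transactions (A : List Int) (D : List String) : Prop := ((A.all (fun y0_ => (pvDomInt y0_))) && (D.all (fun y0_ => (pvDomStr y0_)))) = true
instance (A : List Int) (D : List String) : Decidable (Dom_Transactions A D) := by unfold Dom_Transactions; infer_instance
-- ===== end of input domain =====

-- B replaces A's per-distinct-month rescan of all transactions by one dict-building pass over zip(D, A); return value only, neither mutates.

-- date.split('-') and its month key date.split('-')[1]
-- (Python raises IndexError when there is no '-'; Pre_ excludes that, the port defaults to "")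
def pvSplit (d : String) : List String := (PySem.Str.split? d "-").getD []
def pvMonthOf (d : String) : String := (pvSplit d).getD 1 ""

-- ===== PORT A =====
def Transactions (A : List Int) (D : List String) : Int :=
  let income := (A.filter (fun a => 0 < a)).sum
  let expenses := (A.filter (fun a => a < 0)).sum
  let months : PySem.Set String := PySem.Set.ofList (D.map pvMonthOf)
  let totalMonths := months.length
  let totalFees : Int :=
    if 1 < totalMonths then
      months.foldl (fun fees m =>
        let mt := ((PySem.List.enumerate D).filter (fun p => pvMonthOf p.2 == m)).map
                    (fun p => PySem.List.pyGetD A p.1 0)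
        let cardPayments := (mt.filter (fun a => a < 0)).sum
        if cardPayments ≤ -100 then fees - 5 else fees) (((totalMonths : Int) - 1) * 5)
    else 0
  income - expenses - totalFees

-- ===== PORT B =====
def Transactions_alt (A : List Int) (D : List String) : Int :=
  let ie := A.foldl (fun (st : Int × Int) a =>
      if 0 < a then (st.1 + a, st.2) else if a < 0 then (st.1, st.2 + a) else st) (0, 0)
  let neg := (List.zip D A).foldl (fun (d : PySem.Dict String Int) p =>
      d.insert (pvMonthOf p.1) (d.getD (pvMonthOf p.1) 0 + (if p.2 < 0 then p.2 else 0)))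
      PySem.Dict.empty
  let fees : Int :=
    if 1 < neg.size then
      neg.values.foldl (fun f v => if v ≤ -100 then f - 5 else f) (((neg.size : Int) - 1) * 5)
    else 0
  ie.1 - ie.2 - fees

-- ===== PRECONDITION & SPEC =====
-- Pre_ excludes exactly the inputs where the Python A raises IndexError: a date without '-'
-- (date.split('-')[1]), or D longer than A while D has at least two distinct months (A[x]).
def Pre_Transactions (A : List Int) (D : List String) : Prop :=
  (∀ d ∈ D, 2 ≤ (pvSplit d).length) ∧
  (D.length ≤ A.length ∨ (PySem.Set.ofList (D.map pvMonthOf)).length ≤ 1)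
instance (A : List Int) (D : List String) : Decidable (Pre_Transactions A D) := by
  unfold Pre_Transactions; infer_instance
def pvWitness_Transactions : List Int × List String :=
  ([120, -250, -30], ["2020-01", "2020-01", "2020-02"])

def Spec_Transactions (A : List Int) (D : List String) (out : Int) : Prop := out = Transactions_alt A D
instance (A : List Int) (D : List String) (out : Int) : Decidable (Spec_Transactions A D out) := by unfold Spec_Transactions; infer_instance

-- ===== CLAIM (what is proved, stated in full; the proofs are below) =====
def Claim_equal_Transactions : Prop := ∀ (A : List Int) (D : List String), Dom_Transactions A D → Pre_Transactions A D → Spec_Transactions A D (Transactions A D)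

-- ===== LEMMAS AND PROOFS =====

-- B's income/expenses accumulator computes the two filtered sums
theorem pv_ie_fold (A : List Int) (i e : Int) :
    A.foldl (fun (st : Int × Int) a =>
      if 0 < a then (st.1 + a, st.2) else if a < 0 then (st.1, st.2 + a) else st) (i, e)
    = (i + (A.filter (fun a => 0 < a)).sum, e + (A.filter (fun a => a < 0)).sum) := by
  induction A generalizing i e with
  | nil => simp
  | cons a t ih =>
    simp only [List.foldl_cons, List.filter_cons]
    by_cases h1 : 0 < a
    · simp [h1, ih, show ¬ a < 0 by omega, add_assoc]
    · by_cases h2 : a < 0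
      · simp [h1, h2, ih, add_assoc]
      · simp [h1, h2, ih]

-- value of B's dict at any month
theorem pv_negD (L : List (String × Int)) (d : PySem.Dict String Int) (m : String) :
    (L.foldl (fun (d : PySem.Dict String Int) p =>
        d.insert p.1 (d.getD p.1 0 + (if p.2 < 0 then p.2 else 0))) d).getD m 0
    = d.getD m 0 + ((L.filter (fun p => p.1 == m)).map (fun p => if p.2 < 0 then p.2 else 0)).sum := by
  induction L generalizing d with
  | nil => simp
  | cons p t ih =>
    simp only [List.foldl_cons, List.filter_cons, ih]
    by_cases h : p.1 = m
    · simp [h, add_assoc]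
    · simp [PySem.Dict.getD_insert, show (p.1 == m) = false from beq_eq_false_iff_ne.mpr h,
        show ¬ m = p.1 from fun hh => h hh.symm]

-- sum of negatives = sum of (x if x<0 else 0)
theorem pv_sum_neg (l : List Int) :
    (l.filter (fun a => a < 0)).sum = (l.map (fun a => if a < 0 then a else 0)).sum := by
  induction l with
  | nil => rfl
  | cons a t ih =>
    by_cases h : a < 0 <;> simp [h, ih]

-- the enumerate-and-index view of the transactions equals the zip view (D no longer than A)
theorem pv_enum_eq_zip (A : List Int) (D : List String) (h : D.length ≤ A.length) :
    (PySem.List.enumerate D).map (fun p => (pvMonthOf p.2, PySem.List.pyGetD A p.1 0))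
    = (List.zip D A).map (fun p => (pvMonthOf p.1, p.2)) := by
  apply List.ext_getElem
  · simp [PySem.List.length_enumerate, List.length_zip, Nat.min_eq_left h]
  · intro k h1 h2
    have hk : k < D.length := by
      simpa [PySem.List.length_enumerate] using h1
    have hkA : k < A.length := lt_of_lt_of_le hk h
    have he : k < (PySem.List.enumerate D 0).length := by
      simpa [PySem.List.length_enumerate] using hk
    simp [PySem.List.getElem_enumerate D 0 k he, List.getElem_zip, PySem.List.pyGetD_natCast,
      List.getElem?_eq_getElem hkA]

theorem Transactions_spec : Claim_equal_Transactions := by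
  intro A D _hdom hpre
  unfold Spec_Transactions Transactions Transactions_alt
  obtain ⟨-, hlen⟩ := hpre
  rw [pv_ie_fold]
  simp only [zero_add]
  -- B's dict fold over zip, as a fold over (month, amount) pairs
  set ps : List (String × Int) := (List.zip D A).map (fun p => (pvMonthOf p.1, p.2)) with hps
  set step : PySem.Dict String Int → String × Int → PySem.Dict String Int :=
    fun d p => d.insert p.1 (d.getD p.1 0 + (if p.2 < 0 then p.2 else 0)) with hstep
  have hfold :
      (List.zip D A).foldl (fun (d : PySem.Dict String Int) p =>
        d.insert (pvMonthOf p.1) (d.getD (pvMonthOf p.1) 0 + (if p.2 < 0 then p.2 else 0)))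
        PySem.Dict.empty
      = ps.foldl step PySem.Dict.empty := by
    rw [hps, List.foldl_map]
  rw [hfold]
  set neg := ps.foldl step PySem.Dict.empty with hneg
  have hkeys : neg.keys = PySem.Set.ofList (ps.map Prod.fst) := by
    rw [hneg, hstep]
    rw [PySem.Dict.keys_foldl_insert_key ps Prod.fst
      (fun d p => d.getD p.1 0 + (if p.2 < 0 then p.2 else 0)) PySem.Dict.empty]
    rw [PySem.Dict.keys_empty, PySem.Set.update_nil_left]
  have hnodup : neg.keys.Nodup := by
    rw [hkeys]; exact PySem.Set.nodup_ofList _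
  have hsize : neg.size = neg.keys.length := by
    simp [PySem.Dict.size, PySem.Dict.keys]
  have hgetD : ∀ m, neg.getD m 0
      = ((ps.filter (fun p => p.1 == m)).map (fun p => if p.2 < 0 then p.2 else 0)).sum := by
    intro m
    rw [hneg, hstep, pv_negD, PySem.Dict.getD_empty, zero_add]
  rcases hlen with h1 | h2
  · -- D.length ≤ A.length : keys of the dict are exactly A's month set, values its card payments
    have hfst : ps.map Prod.fst = D.map pvMonthOf := by
      rw [hps, List.map_map]
      calc (List.zip D A).map (Prod.fst ∘ fun p : String × Int => (pvMonthOf p.1, p.2))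
          = ((List.zip D A).map Prod.fst).map pvMonthOf := by
            rw [List.map_map]; rfl
        _ = D.map pvMonthOf := by rw [List.map_fst_zip h1]
    have hk2 : neg.keys = PySem.Set.ofList (D.map pvMonthOf) := by rw [hkeys, hfst]
    have hlen2 : (PySem.Set.ofList (D.map pvMonthOf)).length = neg.size := by
      rw [hsize, hk2]
    -- each month's recomputed card payment equals the dict entry
    have hcp : ∀ m : String,
        ((((PySem.List.enumerate D).filter (fun p => pvMonthOf p.2 == m)).map
            (fun p => PySem.List.pyGetD A p.1 0)).filter (fun a => a < 0)).sum
        = neg.getD m 0 := by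
      intro m
      have hmt : ((PySem.List.enumerate D).filter (fun p => pvMonthOf p.2 == m)).map
            (fun p => PySem.List.pyGetD A p.1 0)
          = (ps.filter (fun p => p.1 == m)).map Prod.snd := by
        have := pv_enum_eq_zip A D h1
        calc ((PySem.List.enumerate D).filter (fun p => pvMonthOf p.2 == m)).map
              (fun p => PySem.List.pyGetD A p.1 0)
            = (((PySem.List.enumerate D).map
                (fun p => (pvMonthOf p.2, PySem.List.pyGetD A p.1 0))).filter
                (fun pr => pr.1 == m)).map Prod.snd := by
              rw [List.filter_map, List.map_map]; rfl
          _ = (ps.filter (fun p => p.1 == m)).map Prod.snd := by rw [this, hps]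
      rw [hmt, pv_sum_neg, List.map_map, hgetD m]
      rfl
    rw [← hlen2]
    by_cases hb : 1 < (PySem.Set.ofList (D.map pvMonthOf)).length
    · simp only [if_pos hb]
      congr 1
      have hvals : neg.values = neg.keys.map (fun k => neg.getD k 0) :=
        PySem.Dict.values_eq_map_keys neg hnodup 0
      rw [hvals, hk2, List.foldl_map]
      apply PySem.List.foldl_congr_mem
      intro acc x _
      rw [hcp x]
    · simp only [if_neg hb]
  · -- at most one distinct month: both fee totals are 0
    have hkeysub : neg.keys ⊆ PySem.Set.ofList (D.map pvMonthOf) := by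
      intro x hx
      rw [hkeys, PySem.Set.mem_ofList] at hx
      rw [PySem.Set.mem_ofList]
      rcases List.mem_map.mp hx with ⟨p, hp, hpx⟩
      rw [hps] at hp
      rcases List.mem_map.mp hp with ⟨q, hq, hqp⟩
      have htot := List.of_mem_zip hq
      exact List.mem_map.mpr ⟨q.1, htot.1, by rw [← hpx, ← hqp]⟩
    have hle : neg.size ≤ 1 := by
      rw [hsize]
      exact le_trans (List.subperm_of_subset hnodup hkeysub).length_le h2
    rw [if_neg (by omega), if_neg (by omega)]
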